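-- pv_equiv track=rewrite | github.com/maralthesage/Documenter-Agent | src/documentation_generator.py | _shift_headings
-- ===== SOURCE A (Python) =====
-- def _shift_headings(text: str, shift: int) -> str:
--     """Shift markdown heading levels while preserving code blocks."""
--     if shift == 0:
--         return text
--
--     lines = text.splitlines()
--     in_code_block = False
--     shifted_lines = []
--
--     for line in lines:
--         if line.startswith("```"):
--             in_code_block = not in_code_block
--             shifted_lines.append(line)
--             continue
--
--         if in_code_block or not line.startswith("#"):
--             shifted_lines.append(line)
--             continue
--
--         hashes = len(line) - len(line.lstrip("#"))
--         new_level = max(1, min(6, hashes + shift))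
--         shifted_lines.append("#" * new_level + line[hashes:])
--
--     return "\n".join(shifted_lines)
-- ===== SOURCE B (Python) =====
-- def _shift_line(line, shift):
--     if not line.startswith("#"):
--         return line
--     hashes = 0
--     while hashes < len(line) and line[hashes] == "#":
--         hashes += 1
--     new_level = max(1, min(6, hashes + shift))
--     return "#" * new_level + line[hashes:]
--
--
-- def _shift_headings(text: str, shift: int) -> str:
--     """Shift markdown heading levels while preserving code blocks."""
--     if shift == 0:
--         return text
--
--     lines = text.splitlines()
--     n = len(lines)
--     out = []
--     i = 0
--     while True:
--         # non-code region: up to (excluding) the next fence line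
--         j = i
--         while j < n and not lines[j].startswith("```"):
--             j += 1
--         for line in lines[i:j]:
--             out.append(_shift_line(line, shift))
--         if j == n:
--             break
--         # fence line, the code region it opens, and the closing fence (if any)
--         k = j + 1
--         while k < n and not lines[k].startswith("```"):
--             k += 1
--         out.extend(lines[j:k + 1])
--         if k == n:
--             break
--         i = k + 1
--     return "\n".join(out)
-- ===== Notes on version B (the rewrite author's own statement) =====
-- stated objective: alternative
-- what changed: A's single pass with a per-line in_code_block boolean is replaced by partitioning the line list into alternating non-code/code regions at ``` fence lines, mapping the heading-shift rule over non-code regions and copying fences and code regions verbatim.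
import Mathlib
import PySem

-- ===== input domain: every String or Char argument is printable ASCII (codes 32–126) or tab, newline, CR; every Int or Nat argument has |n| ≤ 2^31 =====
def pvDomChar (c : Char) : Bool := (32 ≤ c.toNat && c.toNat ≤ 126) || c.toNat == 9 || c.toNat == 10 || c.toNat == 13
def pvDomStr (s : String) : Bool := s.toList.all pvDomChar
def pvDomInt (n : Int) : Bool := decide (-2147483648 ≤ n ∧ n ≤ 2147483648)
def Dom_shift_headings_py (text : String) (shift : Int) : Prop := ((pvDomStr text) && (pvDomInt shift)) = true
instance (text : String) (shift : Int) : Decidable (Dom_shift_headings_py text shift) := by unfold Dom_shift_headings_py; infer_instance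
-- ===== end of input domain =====

-- B replaces A's per-line code-block flag by a fence-delimited region partition of the line
-- list (shift the lines of non-code regions, copy fences and code regions verbatim); same
-- cost, different decomposition ('alternative').

-- ===== PORT A =====
-- A's per-line loop: state = (in_code_block, shifted_lines)
def pvStepA (shift : Int) (st : Bool × List String) (line : String) : Bool × List String :=
  if PySem.Str.startswith line "```" then (!st.1, st.2 ++ [line])
  else if st.1 || !(PySem.Str.startswith line "#") then (st.1, st.2 ++ [line])
  else
    -- line.lstrip("#") ported by hand as dropWhile (· == '#'): exact for a one-character strip set
    let cs := line.toList
    let hashes := cs.length - (cs.dropWhile (fun c => c == '#')).length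
    let newLevel := max 1 (min 6 ((hashes : Int) + shift))
    (st.1, st.2 ++ [String.mk (PySem.List.pyRepeat ['#'] newLevel ++ cs.drop hashes)])

def shift_headings_py (text : String) (shift : Int) : String :=
  if shift == 0 then text
  else PySem.Str.join "\n" ((PySem.Str.splitlines text).foldl (pvStepA shift) (false, [])).2

-- ===== PORT B =====
def pvFenceB (line : String) : Bool := PySem.Str.startswith line "```"

-- _shift_line: the leading-'#' count loop is ported as takeWhile (· == '#')
def pvShiftLineB (shift : Int) (line : String) : String :=
  if PySem.Str.startswith line "#" then
    let cs := line.toList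
    let hashes := (cs.takeWhile (fun c => c == '#')).length
    let newLevel := (max 1 (min 6 ((hashes : Int) + shift))).toNat
    String.mk (List.replicate newLevel '#' ++ cs.drop hashes)
  else line

-- Source B's outer while loop: each round consumes a non-code region, an opening fence,
-- a code region and (if present) the closing fence; the two inner scans are takeWhile/dropWhile
def pvRegionsB (shift : Int) (lines : List String) : List String :=
  let pre := lines.takeWhile (fun l => !pvFenceB l)
  match h : lines.dropWhile (fun l => !pvFenceB l) with
  | [] => pre.map (pvShiftLineB shift)
  | f :: rest =>
    let code := rest.takeWhile (fun l => !pvFenceB l)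
    match h2 : rest.dropWhile (fun l => !pvFenceB l) with
    | [] => pre.map (pvShiftLineB shift) ++ f :: code
    | g :: rest2 => pre.map (pvShiftLineB shift) ++ f :: code ++ g :: pvRegionsB shift rest2
termination_by lines.length
decreasing_by
  have h1 : (lines.dropWhile (fun l => !pvFenceB l)).length ≤ lines.length :=
    (List.dropWhile_sublist _).length_le
  have h3 : (rest.dropWhile (fun l => !pvFenceB l)).length ≤ rest.length :=
    (List.dropWhile_sublist _).length_le
  rw [h] at h1; rw [h2] at h3; simp at h1 h3; omega

def shift_headings_py_alt (text : String) (shift : Int) : String :=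
  if shift == 0 then text
  else PySem.Str.join "\n" (pvRegionsB shift (PySem.Str.splitlines text))

-- ===== PRECONDITION & SPEC =====
def Spec_shift_headings_py (text : String) (shift : Int) (out : String) : Prop := out = shift_headings_py_alt text shift
instance (text : String) (shift : Int) (out : String) : Decidable (Spec_shift_headings_py text shift out) := by unfold Spec_shift_headings_py; infer_instance

-- ===== CLAIM (what is proved, stated in full; the proofs are below) =====
def Claim_equal_shift_headings_py : Prop := ∀ (text : String) (shift : Int), Dom_shift_headings_py text shift → Spec_shift_headings_py text shift (shift_headings_py text shift)

-- ===== LEMMAS AND PROOFS =====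

-- A's loop body, rewritten as a recursion emitting the output lines (proof device)
def pvOutA (shift : Int) : Bool → List String → List String
  | _, [] => []
  | b, l :: ls =>
    if PySem.Str.startswith l "```" then l :: pvOutA shift (!b) ls
    else if b || !(PySem.Str.startswith l "#") then l :: pvOutA shift b ls
    else
      (String.mk (PySem.List.pyRepeat ['#']
          (max 1 (min 6 (((l.toList.length - (l.toList.dropWhile (fun c => c == '#')).length : Nat) : Int) + shift)))
        ++ l.toList.drop (l.toList.length - (l.toList.dropWhile (fun c => c == '#')).length)))
      :: pvOutA shift b ls

theorem pvFoldA_eq_outA (shift : Int) (ls : List String) : ∀ (b : Bool) (acc : List String),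
    (ls.foldl (pvStepA shift) (b, acc)).2 = acc ++ pvOutA shift b ls := by
  induction ls with
  | nil => intro b acc; simp [pvOutA]
  | cons l ls ih =>
    intro b acc
    simp only [List.foldl_cons, pvStepA, pvOutA]
    split_ifs <;> simp [ih]

-- A's rewrite of one heading line equals B's _shift_line on it
theorem pvLine_shift_eq (shift : Int) (l : String) (hs : PySem.Str.startswith l "#" = true) :
    String.mk (PySem.List.pyRepeat ['#']
        (max 1 (min 6 (((l.toList.length - (l.toList.dropWhile (fun c => c == '#')).length : Nat) : Int) + shift)))
      ++ l.toList.drop (l.toList.length - (l.toList.dropWhile (fun c => c == '#')).length))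
    = pvShiftLineB shift l := by
  have hlen : (l.toList.takeWhile (fun c => c == '#')).length
      + (l.toList.dropWhile (fun c => c == '#')).length = l.toList.length := by
    conv_rhs => rw [← List.takeWhile_append_dropWhile (p := fun c => c == '#') (l := l.toList)]
    rw [List.length_append]
  have hh : l.toList.length - (l.toList.dropWhile (fun c => c == '#')).length
      = (l.toList.takeWhile (fun c => c == '#')).length := by omega
  simp only [pvShiftLineB, hs, if_true]
  rw [hh, PySem.List.pyRepeat_singleton]

theorem pvOutA_false_pre (shift : Int) (pre : List String) (ls : List String)
    (hp : ∀ l ∈ pre, pvFenceB l = false) :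
    pvOutA shift false (pre ++ ls) = pre.map (pvShiftLineB shift) ++ pvOutA shift false ls := by
  induction pre with
  | nil => simp
  | cons l pre ih =>
    have hfC : PySem.Chars.startswith l.toList ['`', '`', '`'] = false := by
      have := hp l (by simp); simpa [pvFenceB] using this
    have ih' := ih fun x hx => hp x (by simp [hx])
    simp only [List.cons_append, List.map_cons, pvOutA]
    rw [if_neg (by simp [hfC]), ih']
    by_cases hs : PySem.Str.startswith l "#" = true
    · have hsC : PySem.Chars.startswith l.toList ['#'] = true := by simpa using hs
      rw [if_neg (by simp [hsC]), pvLine_shift_eq shift l hs]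
    · have hsC : PySem.Chars.startswith l.toList ['#'] = false := by
        simpa [Bool.not_eq_true] using hs
      rw [if_pos (by simp [hsC])]
      simp only [pvShiftLineB]
      rw [if_neg hs]

theorem pvOutA_true_pre (shift : Int) (pre : List String) (ls : List String)
    (hp : ∀ l ∈ pre, pvFenceB l = false) :
    pvOutA shift true (pre ++ ls) = pre ++ pvOutA shift true ls := by
  induction pre with
  | nil => simp
  | cons l pre ih =>
    have hfC : PySem.Chars.startswith l.toList ['`', '`', '`'] = false := by
      have := hp l (by simp); simpa [pvFenceB] using this
    have ih' := ih fun x hx => hp x (by simp [hx])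
    simp only [List.cons_append, pvOutA]
    rw [if_neg (by simp [hfC]), if_pos (by simp), ih']

theorem pvOutA_fence (shift : Int) (b : Bool) (f : String) (ls : List String)
    (hf : pvFenceB f = true) : pvOutA shift b (f :: ls) = f :: pvOutA shift (!b) ls := by
  simp only [pvOutA]
  rw [if_pos (show PySem.Str.startswith f "```" = true from hf)]

theorem pvOutA_eq_regionsB (shift : Int) (lines : List String) :
    pvOutA shift false lines = pvRegionsB shift lines := by
  induction lines using pvRegionsB.induct with
  | case1 lines h =>
    have hsplit := List.takeWhile_append_dropWhile (p := fun l => !pvFenceB l) (l := lines)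
    rw [h, List.append_nil] at hsplit
    rw [pvRegionsB, h]
    conv_lhs => rw [← hsplit, ← List.append_nil (lines.takeWhile fun l => !pvFenceB l)]
    rw [pvOutA_false_pre shift _ [] (fun l hl => by
      have := List.mem_takeWhile_imp hl; simpa using this)]
    simp [pvOutA]
  | case2 lines f rest h h2 =>
    have hsplit := List.takeWhile_append_dropWhile (p := fun l => !pvFenceB l) (l := lines)
    rw [h] at hsplit
    have hsplit2 := List.takeWhile_append_dropWhile (p := fun l => !pvFenceB l) (l := rest)
    rw [h2, List.append_nil] at hsplit2
    have hff : pvFenceB f = true := by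
      have := List.head?_dropWhile_not (fun l => !pvFenceB l) lines
      rw [h] at this; simpa using this
    rw [pvRegionsB, h]
    simp only []
    conv_lhs => rw [← hsplit]
    rw [pvOutA_false_pre shift _ _ (fun l hl => by
      have := List.mem_takeWhile_imp hl; simpa using this)]
    rw [pvOutA_fence shift false f rest hff]
    simp only [Bool.not_false]
    conv_lhs => rw [← hsplit2, ← List.append_nil (rest.takeWhile fun l => !pvFenceB l)]
    rw [pvOutA_true_pre shift _ [] (fun l hl => by
      have := List.mem_takeWhile_imp hl; simpa using this)]
    simp only [pvOutA, List.append_nil]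
    split
    · rfl
    · next g rest2 heq => rw [h2] at heq; cases heq
  | case3 lines f rest h g rest2 h2 ih =>
    have hsplit := List.takeWhile_append_dropWhile (p := fun l => !pvFenceB l) (l := lines)
    rw [h] at hsplit
    have hsplit2 := List.takeWhile_append_dropWhile (p := fun l => !pvFenceB l) (l := rest)
    rw [h2] at hsplit2
    have hff : pvFenceB f = true := by
      have := List.head?_dropWhile_not (fun l => !pvFenceB l) lines
      rw [h] at this; simpa using this
    have hfg : pvFenceB g = true := by
      have := List.head?_dropWhile_not (fun l => !pvFenceB l) rest
      rw [h2] at this; simpa using this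
    rw [pvRegionsB, h]
    simp only []
    conv_lhs => rw [← hsplit]
    rw [pvOutA_false_pre shift _ _ (fun l hl => by
      have := List.mem_takeWhile_imp hl; simpa using this)]
    rw [pvOutA_fence shift false f rest hff]
    simp only [Bool.not_false]
    conv_lhs => rw [← hsplit2]
    rw [pvOutA_true_pre shift _ _ (fun l hl => by
      have := List.mem_takeWhile_imp hl; simpa using this)]
    rw [pvOutA_fence shift true g rest2 hfg]
    simp only [Bool.not_true]
    rw [ih]
    split
    · next heq => rw [h2] at heq; cases heq
    · next g' rest2' heq =>
        rw [h2] at heq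
        injection heq with e1 e2
        subst e1; subst e2
        simp

-- ===== VERDICT (by name: the statement is the Claim_ definition above) =====
theorem shift_headings_py_spec : Claim_equal_shift_headings_py := by
  intro text shift _
  unfold Spec_shift_headings_py shift_headings_py shift_headings_py_alt
  by_cases h0 : shift == 0
  · simp [h0]
  · simp only [h0, Bool.false_eq_true, if_false]
    rw [pvFoldA_eq_outA, List.nil_append, pvOutA_eq_regionsB]
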